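-- pv_equiv track=rewrite | github.com/AngusBD/ImageTableExtractionWithPaddleOCR | DataToExcel.py | calculate_horizontal_gap_distance
-- ===== SOURCE A (Python) =====
-- def calculate_horizontal_gap_distance(sublist):
--     first_non_none_index = None
--     second_non_none_index = None
--     distance = 0
--
--     # 找到第一個非None值索引
--     for i, item in enumerate(sublist[:-1]):
--         if item is not None and sublist[i+1] is None:
--             first_non_none_index = i
--             break
--
--     # 找到第二個非None值索引
--     if first_non_none_index is not None:
--         for i, item in enumerate(sublist[first_non_none_index+1:], start=first_non_none_index+1):
--             if item is not None:
--                 second_non_none_index = i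
--                 break
--
--     # 計算距離
--     if first_non_none_index is not None and second_non_none_index is not None:
--         distance = second_non_none_index - first_non_none_index
--     return first_non_none_index, second_non_none_index, distance
-- ===== SOURCE B (Python) =====
-- def calculate_horizontal_gap_distance(sublist):
--     # Index-set formulation: collect positions of non-None values once,
--     # then the answer is determined by the first gap between adjacent positions.
--     nn = [i for i, v in enumerate(sublist) if v is not None]
--     for a, b in zip(nn, nn[1:]):
--         if b > a + 1:
--             return a, b, b - a
--     if nn and nn[-1] < len(sublist) - 1:
--         return nn[-1], None, 0
--     return None, None, 0
-- ===== Notes on version B (the rewrite author's own statement) =====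
-- stated objective: alternative
-- what changed: A scans the original list twice (a lookahead scan over sublist[:-1] for a non-None-followed-by-None boundary, then a restarted scan over the slice after it); B instead builds the list of non-None indices once and reads the answer off the first gap between adjacent entries of that index list, never re-inspecting the original elements.
import Mathlib
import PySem

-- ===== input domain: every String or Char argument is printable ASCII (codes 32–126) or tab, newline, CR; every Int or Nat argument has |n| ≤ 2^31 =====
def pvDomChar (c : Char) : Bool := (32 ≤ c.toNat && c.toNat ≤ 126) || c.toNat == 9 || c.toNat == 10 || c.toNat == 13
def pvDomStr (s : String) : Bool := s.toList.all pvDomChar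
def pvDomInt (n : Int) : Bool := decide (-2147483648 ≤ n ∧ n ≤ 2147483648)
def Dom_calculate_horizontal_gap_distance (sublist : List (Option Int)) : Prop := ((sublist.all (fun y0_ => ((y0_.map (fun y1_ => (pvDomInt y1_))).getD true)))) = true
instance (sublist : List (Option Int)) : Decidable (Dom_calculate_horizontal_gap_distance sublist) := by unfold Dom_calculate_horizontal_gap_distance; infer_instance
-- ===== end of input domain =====

-- B replaces A's two element-level scans (lookahead boundary scan over sublist[:-1], then a
-- restarted scan of the slice after it) by the index-set formulation: collect the non-None
-- positions once and read the answer off the first gap between adjacent positions; objective: alternative.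

-- ===== PORT A =====
-- first loop: for i, item in enumerate(sublist[:-1]): if item is not None and sublist[i+1] is None: break
def aLoop1 (sublist : List (Option Int)) : List (Option Int) → Int → Option Int
  | [], _ => none
  | item :: rest, i =>
      if item ≠ none ∧ PySem.List.pyGet? sublist (i + 1) = some none then some i
      else aLoop1 sublist rest (i + 1)

-- second loop: for i, item in enumerate(sublist[first+1:], start=first+1): if item is not None: break
def aLoop2 : List (Option Int) → Int → Option Int
  | [], _ => none
  | item :: rest, i => if item ≠ none then some i else aLoop2 rest (i + 1)

def calculate_horizontal_gap_distance (sublist : List (Option Int)) : Option Int × Option Int × Int :=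
  let first := aLoop1 sublist (PySem.List.slice sublist none (some (-1))) 0
  let second := match first with
    | none => none
    | some f => aLoop2 (PySem.List.slice sublist (some (f + 1)) none) (f + 1)
  let distance : Int := match first, second with
    | some f, some s => s - f
    | _, _ => 0
  (first, second, distance)

-- ===== PORT B =====
-- nn = [i for i, v in enumerate(sublist) if v is not None]
def nnIdx : List (Option Int) → Int → List Int
  | [], _ => []
  | some _ :: rest, i => i :: nnIdx rest (i + 1)
  | none :: rest, i => nnIdx rest (i + 1)

-- for a, b in zip(nn, nn[1:]): if b > a + 1: return a, b, b - a
def pairScan : List Int → Option (Int × Int)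
  | a :: b :: rest => if b > a + 1 then some (a, b) else pairScan (b :: rest)
  | _ => none

def calculate_horizontal_gap_distance_alt (sublist : List (Option Int)) : Option Int × Option Int × Int :=
  let nn := nnIdx sublist 0
  match pairScan nn with
  | some (a, b) => (some a, some b, b - a)
  | none =>
    match nn.getLast? with
    | some a => if a < (sublist.length : Int) - 1 then (some a, none, 0) else (none, none, 0)
    | none => (none, none, 0)

-- ===== PRECONDITION & SPEC =====
def Spec_calculate_horizontal_gap_distance (sublist : List (Option Int)) (out : Option Int × Option Int × Int) : Prop := out = calculate_horizontal_gap_distance_alt sublist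
instance (sublist : List (Option Int)) (out : Option Int × Option Int × Int) : Decidable (Spec_calculate_horizontal_gap_distance sublist out) := by unfold Spec_calculate_horizontal_gap_distance; infer_instance

-- ===== CLAIM (what is proved, stated in full; the proofs are below) =====
def Claim_equal_calculate_horizontal_gap_distance : Prop := ∀ (sublist : List (Option Int)), Dom_calculate_horizontal_gap_distance sublist → Spec_calculate_horizontal_gap_distance sublist (calculate_horizontal_gap_distance sublist)

-- ===== LEMMAS AND PROOFS =====

-- a fused reference state machine used only inside the proof: A and B are each shown equal to it
def refGo2 : List (Option Int) → Int → Option Int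
  | [], _ => none
  | some _ :: _, i => some i
  | none :: rest, i => refGo2 rest (i + 1)

def refGo1 : List (Option Int) → Option Int → Int → Option Int × Option Int × Int
  | [], _, _ => (none, none, 0)
  | item :: rest, prev, i =>
      if item = none ∧ prev ≠ none then
        match refGo2 rest (i + 1) with
        | none => (some (i - 1), none, 0)
        | some j => (some (i - 1), some j, j - (i - 1))
      else refGo1 rest item (i + 1)

-- A's answer as a function of where the first loop stopped
def assembleA (sublist : List (Option Int)) (first : Option Int) : Option Int × Option Int × Int :=
  match first with
  | none => (none, none, 0)
  | some f =>
      match aLoop2 (PySem.List.slice sublist (some (f + 1)) none) (f + 1) with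
      | none => (some f, none, 0)
      | some s => (some f, some s, s - f)

theorem assembleA_some (sublist : List (Option Int)) (f : Int) :
    assembleA sublist (some f)
      = match aLoop2 (PySem.List.slice sublist (some (f + 1)) none) (f + 1) with
        | none => (some f, none, 0)
        | some s => (some f, some s, s - f) := rfl

theorem aLoop2_eq_refGo2 (l : List (Option Int)) (i : Int) : aLoop2 l i = refGo2 l i := by
  induction l generalizing i with
  | nil => rfl
  | cons x rest ih =>
      cases x <;> simp [aLoop2, refGo2, ih]

theorem A_eq_assemble (sublist : List (Option Int)) :
    calculate_horizontal_gap_distance sublist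
      = assembleA sublist (aLoop1 sublist sublist.dropLast 0) := by
  unfold calculate_horizontal_gap_distance assembleA
  rw [PySem.List.slice_to_neg_one]
  rcases aLoop1 sublist sublist.dropLast 0 with _ | f
  · rfl
  · rcases h : aLoop2 (PySem.List.slice sublist (some (f + 1)) none) (f + 1) with _ | s <;> simp [h]

-- lockstep lemma: the fused machine just past position k equals A's loop resumed at index k
theorem A_lockstep (sublist : List (Option Int)) (k : Nat) (x : Option Int) (xs : List (Option Int))
    (h : sublist.drop k = x :: xs) :
    refGo1 xs x ((k : Int) + 1) = assembleA sublist (aLoop1 sublist ((x :: xs).dropLast) (k : Int)) := by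
  induction xs generalizing k x with
  | nil => rfl
  | cons y rest ih =>
      have hy : sublist.drop (k + 1) = y :: rest := by
        rw [← List.tail_drop, h]
        rfl
      have hcast : ((k : Int) + 1) = (((k + 1 : Nat)) : Int) := by push_cast; ring
      have hgety : PySem.List.pyGet? sublist ((k : Int) + 1) = some y := by
        rw [hcast, PySem.List.pyGet?_natCast, ← List.head?_drop, hy]
        rfl
      have hdl : (x :: y :: rest).dropLast = x :: (y :: rest).dropLast := by simp
      rw [hdl]
      by_cases hc : x ≠ none ∧ y = none
      · obtain ⟨hx, hyn⟩ := hc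
        subst hyn
        have hA : aLoop1 sublist (x :: (none :: rest).dropLast) (k : Int) = some (k : Int) := by
          simp [aLoop1, hx, hgety]
        rw [hA, assembleA_some]
        have hslice : PySem.List.slice sublist (some ((k : Int) + 1)) none = none :: rest := by
          rw [hcast, PySem.List.slice_from_natCast, hy]
        rw [hslice]
        have hB : refGo1 (none :: rest) x ((k : Int) + 1)
            = match refGo2 rest ((k : Int) + 1 + 1) with
              | none => (some ((k : Int) + 1 - 1), none, 0)
              | some j => (some ((k : Int) + 1 - 1), some j, j - ((k : Int) + 1 - 1)) := by
          simp [refGo1, hx]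
        rw [hB]
        have h2 : aLoop2 (none :: rest) ((k : Int) + 1) = refGo2 rest ((k : Int) + 1 + 1) := by
          simp [aLoop2, aLoop2_eq_refGo2]
        rw [h2]
        rcases refGo2 rest ((k : Int) + 1 + 1) with _ | j <;> simp
      · have hnotB : ¬ (y = none ∧ x ≠ none) := by tauto
        have hg : ¬ (x ≠ none ∧ PySem.List.pyGet? sublist ((k : Int) + 1) = some none) := by
          rintro ⟨hx, hn⟩
          rw [hgety] at hn
          exact hc ⟨hx, by simpa using hn⟩
        have hA : aLoop1 sublist (x :: (y :: rest).dropLast) (k : Int)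
            = aLoop1 sublist ((y :: rest).dropLast) ((k : Int) + 1) := by
          simp [aLoop1, hg]
        have hB : refGo1 (y :: rest) x ((k : Int) + 1) = refGo1 rest y ((k : Int) + 1 + 1) := by
          simp [refGo1, hnotB]
        rw [hA, hB]
        have := ih (k := k + 1) (x := y) hy
        push_cast at this ⊢
        exact this

theorem A_eq_ref (sublist : List (Option Int)) :
    calculate_horizontal_gap_distance sublist = refGo1 sublist none 0 := by
  rw [A_eq_assemble]
  cases hs : sublist with
  | nil => rfl
  | cons x xs =>
      have hB : refGo1 (x :: xs) none 0 = refGo1 xs x 1 := by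
        simp [refGo1]
      rw [hB]
      have := A_lockstep (x :: xs) 0 x xs (by simp)
      simpa using this.symm

-- B's assembly of the triple from a length and an index list
def finishB (len : Int) (nn : List Int) : Option Int × Option Int × Int :=
  match pairScan nn with
  | some (a, b) => (some a, some b, b - a)
  | none =>
    match nn.getLast? with
    | some a => if a < len - 1 then (some a, none, 0) else (none, none, 0)
    | none => (none, none, 0)

theorem alt_eq_finishB (sublist : List (Option Int)) :
    calculate_horizontal_gap_distance_alt sublist
      = finishB (sublist.length : Int) (nnIdx sublist 0) := rfl

theorem refGo2_eq_head_nnIdx (l : List (Option Int)) (i : Int) :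
    refGo2 l i = (nnIdx l i).head? := by
  induction l generalizing i with
  | nil => rfl
  | cons x rest ih => cases x <;> simp [refGo2, nnIdx, ih]

theorem nnIdx_head_ge (l : List (Option Int)) (i j : Int)
    (h : (nnIdx l i).head? = some j) : i ≤ j := by
  induction l generalizing i with
  | nil => simp [nnIdx] at h
  | cons x rest ih =>
      cases x with
      | none =>
          have := ih (i := i + 1) (by simpa [nnIdx] using h)
          omega
      | some v =>
          simp [nnIdx] at h
          omega

theorem finishB_contig (len a : Int) (t : List Int) :
    finishB len (a :: (a + 1) :: t) = finishB len ((a + 1) :: t) := by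
  unfold finishB
  have hp : pairScan (a :: (a + 1) :: t) = pairScan ((a + 1) :: t) := by
    simp [pairScan]
  rw [hp]
  rcases pairScan ((a + 1) :: t) with _ | p
  · simp
  · rfl

-- the fused machine equals B's finish over the not-yet-collected indices; prev ≠ none is
-- recorded as the pending index i-1 at the head of the index list
theorem ref_eq_finishB (l : List (Option Int)) (x : Option Int) (i : Int) :
    refGo1 l x i
      = finishB (i + l.length)
          (match x with | none => nnIdx l i | some _ => (i - 1) :: nnIdx l i) := by
  induction l generalizing x i with
  | nil =>
      cases x with
      | none => rfl
      | some v =>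
          simp only [refGo1, nnIdx, finishB, pairScan, List.getLast?_singleton, List.length_nil]
          norm_num
  | cons y rest ih =>
      cases x with
      | none =>
          cases y with
          | none =>
              have := ih (x := none) (i := i + 1)
              simp only [refGo1, nnIdx] at *
              simpa [List.length_cons, add_assoc, add_comm, add_left_comm] using this
          | some v =>
              have := ih (x := some v) (i := i + 1)
              simp only [refGo1, nnIdx] at *
              have h1 : (i : Int) + 1 - 1 = i := by ring
              rw [h1] at this
              simpa [List.length_cons, add_assoc, add_comm, add_left_comm] using this
      | some w =>
          cases y with
          | none =>
              -- boundary fires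
              have hfire : refGo1 (none :: rest) (some w) i
                  = match refGo2 rest (i + 1) with
                    | none => (some (i - 1), none, 0)
                    | some j => (some (i - 1), some j, j - (i - 1)) := by
                simp [refGo1]
              rw [hfire]
              have hnn : nnIdx (none :: rest) i = nnIdx rest (i + 1) := rfl
              rw [hnn, refGo2_eq_head_nnIdx]
              rcases hh : (nnIdx rest (i + 1)).head? with _ | j
              · -- no later non-None: nn = [i-1]
                have hnil : nnIdx rest (i + 1) = [] := by
                  cases hx : nnIdx rest (i + 1) with
                  | nil => rfl
                  | cons a t => rw [hx] at hh; simp at hh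
                rw [hnil]
                simp only [finishB, pairScan, List.getLast?_singleton]
                simp only [List.length_cons]
                rw [if_pos (by push_cast; omega)]
              · -- later non-None j ≥ i+1 > (i-1)+1: first pair is the gap
                have hge : i + 1 ≤ j := nnIdx_head_ge rest (i + 1) j hh
                obtain ⟨t, ht⟩ : ∃ t, nnIdx rest (i + 1) = j :: t := by
                  cases hx : nnIdx rest (i + 1) with
                  | nil => rw [hx] at hh; simp at hh
                  | cons a t =>
                      rw [hx] at hh
                      simp at hh
                      exact ⟨t, by rw [hh]⟩
                rw [ht]
                simp only [finishB, pairScan]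
                rw [if_pos (by omega)]
          | some v =>
              -- contiguous: recurse with pending index i at head
              have hstep : refGo1 (some v :: rest) (some w) i = refGo1 rest (some v) (i + 1) := by
                simp [refGo1]
              rw [hstep]
              have := ih (x := some v) (i := i + 1)
              have h1 : (i : Int) + 1 - 1 = i := by ring
              rw [h1] at this
              rw [this]
              have hnn : nnIdx (some v :: rest) i = i :: nnIdx rest (i + 1) := rfl
              rw [hnn]
              have := finishB_contig (i + 1 + rest.length) (i - 1) (nnIdx rest (i + 1))
              have h2 : (i : Int) - 1 + 1 = i := by ring
              rw [h2] at this
              rw [← this]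
              congr 1
              simp [List.length_cons]
              ring

-- ===== VERDICT (by name: the statement is the Claim_ definition above) =====
theorem calculate_horizontal_gap_distance_spec : Claim_equal_calculate_horizontal_gap_distance := by
  intro sublist _
  unfold Spec_calculate_horizontal_gap_distance
  rw [A_eq_ref, alt_eq_finishB, ref_eq_finishB]
  simp
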